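-- pv_equiv track=rewrite | github.com/anilkumarpradhan2021/data_structures_algorithms | hardProblems/WordBreakProblem.py | wordBreakProblemRecurssion
-- ===== SOURCE A (Python) =====
-- refernce_dict = {"mobile", "samsung", "sam", "sung",
--                             "man", "mango", "icecream", "and",
--                             "go", "i", "like", "ice", "cream"}
--
-- def wordBreakProblemRecurssion(input, words=[]):
--     if len(input) == 0:
--         return True
--
--     for i in range(1, len(input) + 1):
--
--         # add it to word
--         words.append(input[:i])
--
--         '''
--             // Now we will first divide the word into two parts ,
--             // the prefix will have a length of i and check if it is
--             // present in dictionary ,if yes then we will check for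
--             // suffix of length size-i recursively. if both prefix and
--             // suffix are present the word is found in dictionary.
--         '''
--         if input[:i] in refernce_dict and wordBreakProblemRecurssion(input[i:], words):
--             return True
--
--         # remove it from words as both condition not satisfied
--         words.pop()
--     return False
-- ===== SOURCE B (Python) =====
-- refernce_dict = {"mobile", "samsung", "sam", "sung",
--                             "man", "mango", "icecream", "and",
--                             "go", "i", "like", "ice", "cream"}
--
-- def wordBreakProblemRecurssion(input, words=[]):
--     # Suffix DP built back-to-front: can[m-k] answers "is input[i+k:] breakable"
--     # for the current position i; only prefixes up to the longest dictionary
--     # word are probed, O(1) appends.  (Return value only: A also mutates `words`.)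
--     maxlen = max(len(w) for w in refernce_dict)
--     can = [True]
--     for i in range(len(input) - 1, -1, -1):
--         m = len(can)
--         can.append(any(can[m - j] and input[i:i + j] in refernce_dict
--                        for j in range(1, min(maxlen, m) + 1)))
--     return can[-1]
-- ===== Notes on version B (the rewrite author's own statement) =====
-- stated objective: faster
-- what changed: Replaces A's exponential backtracking recursion (with its bookkeeping list) by an iterative suffix DP table built back-to-front, probing only prefixes up to the longest dictionary word; return value only — A also mutates its `words` argument.
import Mathlib
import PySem

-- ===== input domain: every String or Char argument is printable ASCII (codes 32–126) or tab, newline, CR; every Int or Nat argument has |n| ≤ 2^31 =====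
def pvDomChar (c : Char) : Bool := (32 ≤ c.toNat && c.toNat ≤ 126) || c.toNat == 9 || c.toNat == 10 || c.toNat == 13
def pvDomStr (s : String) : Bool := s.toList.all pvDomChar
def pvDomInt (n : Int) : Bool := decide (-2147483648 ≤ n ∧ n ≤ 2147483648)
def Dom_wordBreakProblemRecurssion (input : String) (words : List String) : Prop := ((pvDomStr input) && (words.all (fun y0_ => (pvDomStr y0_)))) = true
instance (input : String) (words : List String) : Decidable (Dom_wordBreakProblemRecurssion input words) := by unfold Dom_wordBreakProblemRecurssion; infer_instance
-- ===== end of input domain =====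

-- B replaces A's exponential backtracking recursion by a suffix DP probing only
-- prefixes up to the longest dictionary word,
-- built back-to-front; equivalence is about the RETURN
-- value only (A also mutates its `words` argument, which never influences what A returns).

-- the module-level set `refernce_dict` (a PySem.Set String: distinct elements)
def pvRefDict : PySem.Set String :=
  PySem.Set.ofList ["mobile", "samsung", "sam", "sung", "man", "mango",
                    "icecream", "and", "go", "i", "like", "ice", "cream"]

-- ===== PORT A =====
-- A's recursion on the string, on List Char; `words` only gets appended/popped in
-- Python and never affects the result, so the port carries no `words` state.
def pvWbA (s : List Char) : Bool :=
  if s.length = 0 then true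
  else
    (List.range' 1 s.length).attach.any (fun ⟨i, _hi⟩ =>
      pvRefDict.contains (String.ofList (s.take i)) && pvWbA (s.drop i))
termination_by s.length
decreasing_by
  simp only [List.mem_range'_1] at _hi
  simp only [List.length_drop]
  omega

def wordBreakProblemRecurssion (input : String) (words : List String) : Bool :=
  pvWbA input.toList

-- ===== PORT B =====
-- the `can.append(any(...))` loop from Source B: builds, from the right end of the
-- string, the list of answers "is this suffix breakable" (stored in reverse:
-- entry m-k answers the suffix starting k after the current position).
-- maxlen = max(len(w) for w in refernce_dict)
def pvMaxLen : Nat := ((pvRefDict.map (fun w => w.toList.length)).max?).getD 0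

def pvWbBuild : List Char → List Bool
  | [] => [true]
  | c :: rest =>
      let t := pvWbBuild rest
      let m := t.length
      t ++ [(List.range' 1 (min pvMaxLen m)).any (fun j =>
          t.getD (m - j) false && pvRefDict.contains (String.ofList ((c :: rest).take j)))]

def wordBreakProblemRecurssion_alt (input : String) (words : List String) : Bool :=
  (pvWbBuild input.toList).getLastD true

-- ===== PRECONDITION & SPEC =====
def Spec_wordBreakProblemRecurssion (input : String) (words : List String) (out : Bool) : Prop := out = wordBreakProblemRecurssion_alt input words
instance (input : String) (words : List String) (out : Bool) : Decidable (Spec_wordBreakProblemRecurssion input words out) := by unfold Spec_wordBreakProblemRecurssion; infer_instance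

-- ===== CLAIM (what is proved, stated in full; the proofs are below) =====
def Claim_equal_wordBreakProblemRecurssion : Prop := ∀ (input : String) (words : List String), Dom_wordBreakProblemRecurssion input words → Spec_wordBreakProblemRecurssion input words (wordBreakProblemRecurssion input words)

-- ===== LEMMAS AND PROOFS =====

-- every dictionary word has length at most pvMaxLen (= 8)
theorem pv_word_len (w : String) (h : pvRefDict.contains w = true) :
    w.toList.length ≤ pvMaxLen := by
  have hm : w ∈ (["mobile", "samsung", "sam", "sung", "man", "mango",
      "icecream", "and", "go", "i", "like", "ice", "cream"] : List String) := by
    have := h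
    simp only [pvRefDict, PySem.Set.contains] at this
    simpa using this
  fin_cases hm <;> decide

-- entry m-j of the reversed suffix table of `rest` is A's answer on rest.drop (j-1)
theorem pv_getD_rev (rest : List Char) (j : ℕ) (hj : 1 ≤ j ∧ j ≤ rest.length + 1) :
    ((rest.tails.map pvWbA).reverse.getD (rest.length + 1 - j) false)
      = pvWbA (rest.drop (j - 1)) := by
  have hlt : rest.length + 1 - j < (rest.tails.map pvWbA).reverse.length := by
    simp only [List.length_reverse, List.length_map, List.length_tails]; omega
  rw [List.getD_eq_getElem _ _ hlt, List.getElem_reverse]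
  have hidx : (rest.tails.map pvWbA).length - 1 - (rest.length + 1 - j) = j - 1 := by
    simp only [List.length_map, List.length_tails]; omega
  simp only [hidx]
  simp [List.getElem_tails]

-- the DP table is exactly A's recursion evaluated on every suffix, in reverse
theorem pvWbBuild_eq_tails (s : List Char) :
    pvWbBuild s = (s.tails.map pvWbA).reverse := by
  induction s with
  | nil =>
      simp only [pvWbBuild, List.tails, List.map, List.reverse]
      rw [pvWbA]
      simp
  | cons c rest ih =>
      simp only [pvWbBuild, List.tails_cons, List.map_cons, List.reverse_cons, ih]
      congr 1
      have hm : (rest.tails.map pvWbA).reverse.length = rest.length + 1 := by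
        simp
      simp only [hm]
      congr 1
      rw [pvWbA]
      simp only [List.length_cons]
      have hne : ¬ (rest.length + 1 = 0) := by omega
      rw [if_neg hne]
      apply Bool.eq_iff_iff.mpr
      simp only [List.any_eq_true, List.mem_attach, true_and, Subtype.exists,
        List.mem_range'_1, Bool.and_eq_true]
      constructor
      · rintro ⟨j, hj, hval, hcon⟩
        have hj' : 1 ≤ j ∧ j ≤ rest.length + 1 := by
          rcases hj with ⟨h1, h2⟩
          have := min_le_right pvMaxLen (rest.length + 1)
          omega
        refine ⟨j, ⟨hj'.1, by omega⟩, hcon, ?_⟩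
        rw [pv_getD_rev rest j hj'] at hval
        have hd : (c :: rest).drop j = rest.drop (j - 1) := by
          obtain ⟨k, rfl⟩ : ∃ k, j = k + 1 := ⟨j - 1, by omega⟩
          simp
        rwa [hd]
      · rintro ⟨j, hj, hcon, hval⟩
        have hj' : 1 ≤ j ∧ j ≤ rest.length + 1 := by omega
        -- j cannot exceed the longest dictionary word, since the prefix is in the dict
        have hjm : j ≤ pvMaxLen := by
          have hlen := pv_word_len _ hcon
          have htl : (String.ofList ((c :: rest).take j)).toList = (c :: rest).take j := by
            simp
          rw [htl, List.length_take] at hlen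
          simp only [List.length_cons] at hlen
          omega
        refine ⟨j, ⟨hj'.1, by omega⟩, ?_, hcon⟩
        rw [pv_getD_rev rest j hj']
        have hd : (c :: rest).drop j = rest.drop (j - 1) := by
          obtain ⟨k, rfl⟩ : ∃ k, j = k + 1 := ⟨j - 1, by omega⟩
          simp
        rwa [hd] at hval

theorem pvWbA_eq_last (s : List Char) : pvWbA s = (pvWbBuild s).getLastD true := by
  rw [pvWbBuild_eq_tails]
  cases s <;> simp [List.tails]

-- ===== VERDICT (by name: the statement is the Claim_ definition above) =====
theorem wordBreakProblemRecurssion_spec : Claim_equal_wordBreakProblemRecurssion := by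
  intro input words _
  unfold Spec_wordBreakProblemRecurssion wordBreakProblemRecurssion wordBreakProblemRecurssion_alt
  exact pvWbA_eq_last input.toList
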